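-- pv_equiv track=rewrite | github.com/AliceInWonderland61/spring2025-python | Week2/week-2-S2-P1.py | num_equiv_species_pairs
-- ===== SOURCE A (Python) =====
-- def num_equiv_species_pairs(species_pairs):
--     #i think we did something similar to this ? or maybe not idk
--     # we need to traverse each
--     #we could probably assign each pair to like a variable and then compare
--     #like a is [0][0] b is [0][1] and then we compare it to the next pair and see if they are equivalent
--     #might not be the best run time but it should work
--
-- #create a varable counter to keep track of how many pairs we encoutnter
--     counter=0
-- #so we traverse the list of species paris
--     for i in range(len(species_pairs)):
--         #because in the list they're saved like [[1,2], [3,4],[4,3]] etc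
--         #[i] is going to the the first pair we encounter, in this case it would be referring to [1,2]
--         #[0] is referring to the first element in that pair which is 1
--         #[1] is referring to the second element in that pair which is 2
--
--         #the only one tat changes is i because we progress to the next pair
--         a=species_pairs[i][0]
--         b=species_pairs[i][1]
--         for j in range(i+1,len(species_pairs)):
--             #now we look at the next pair
--             #again j signifies the pair we're looking at
--             #[0] or [1] referrs to the position of the pair
--             c=species_pairs[j][0]
--             d=species_pairs[j][1]
--
--             #we check if any of these equal each other
--             #keep in mind we're comparing the current pair to the next pair, we will remian in the first pair until we finish going through all
--             #the pairs inside species_pair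
--             if (a==c and b==d) or (a==d and b==c):
--                 counter+=1
--     return counter
-- ===== SOURCE B (Python) =====
-- def num_equiv_species_pairs(species_pairs):
--     counts = {}
--     for pair in species_pairs:
--         a, b = pair[0], pair[1]
--         key = (a, b) if a <= b else (b, a)
--         counts[key] = counts.get(key, 0) + 1
--     return sum(k * (k - 1) // 2 for k in counts.values())
-- ===== Notes on version B (the rewrite author's own statement) =====
-- stated objective: alternative
-- what changed: Replaces the all-pairs double loop by a single pass that counts canonical (sorted) pairs in a dict and sums k*(k-1)//2 per group.
import Mathlib
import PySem

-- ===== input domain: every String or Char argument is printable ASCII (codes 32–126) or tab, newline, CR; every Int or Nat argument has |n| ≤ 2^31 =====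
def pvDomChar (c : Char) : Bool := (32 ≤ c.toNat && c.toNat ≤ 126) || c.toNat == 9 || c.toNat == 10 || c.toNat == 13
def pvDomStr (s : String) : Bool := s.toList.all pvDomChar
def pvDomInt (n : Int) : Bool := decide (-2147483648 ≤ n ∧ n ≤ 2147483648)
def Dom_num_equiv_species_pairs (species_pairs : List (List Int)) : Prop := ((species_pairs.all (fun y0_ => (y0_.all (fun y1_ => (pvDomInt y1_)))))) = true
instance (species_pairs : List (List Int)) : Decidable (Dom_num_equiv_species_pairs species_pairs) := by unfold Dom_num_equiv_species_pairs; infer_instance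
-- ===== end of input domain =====

-- B replaces A's all-pairs double loop by one dict-counting pass over canonical (sorted)
-- pairs, summing k*(k-1)//2 per group (alternative single-pass algorithm).

-- ===== PORT A =====
-- A's double index loop; under Pre_ every index read is in range, so pyGetD's default is never read.
def num_equiv_species_pairs (species_pairs : List (List Int)) : Int :=
  (PySem.List.pyRange 0 (PySem.List.len species_pairs) 1).foldl (fun counter i =>
    let a := PySem.List.pyGetD (PySem.List.pyGetD species_pairs i []) 0 0
    let b := PySem.List.pyGetD (PySem.List.pyGetD species_pairs i []) 1 0
    (PySem.List.pyRange (i + 1) (PySem.List.len species_pairs) 1).foldl (fun counter j =>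
      let c := PySem.List.pyGetD (PySem.List.pyGetD species_pairs j []) 0 0
      let d := PySem.List.pyGetD (PySem.List.pyGetD species_pairs j []) 1 0
      if (a = c ∧ b = d) ∨ (a = d ∧ b = c) then counter + 1 else counter) counter) 0

-- ===== PORT B =====
def num_equiv_species_pairs_alt (species_pairs : List (List Int)) : Int :=
  let counts := species_pairs.foldl (fun (d : PySem.Dict (Int × Int) Int) pair =>
    let a := PySem.List.pyGetD pair 0 0
    let b := PySem.List.pyGetD pair 1 0
    let key := if a ≤ b then (a, b) else (b, a)
    d.insert key (d.getD key 0 + 1)) PySem.Dict.empty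
  (counts.values.map (fun k => PySem.Int.floordiv (k * (k - 1)) 2)).sum

-- ===== PRECONDITION & SPEC =====
-- Pre_ excludes exactly the inputs where Python A raises IndexError: an inner list with
-- fewer than two elements (A reads pair[0] and pair[1] of every entry).
def Pre_num_equiv_species_pairs (species_pairs : List (List Int)) : Prop :=
  ∀ p ∈ species_pairs, 2 ≤ p.length
instance (species_pairs : List (List Int)) : Decidable (Pre_num_equiv_species_pairs species_pairs) := by unfold Pre_num_equiv_species_pairs; infer_instance
def pvWitness_num_equiv_species_pairs : List (List Int) := [[1, 2], [3, 4], [2, 1]]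

def Spec_num_equiv_species_pairs (species_pairs : List (List Int)) (out : Int) : Prop := out = num_equiv_species_pairs_alt species_pairs
instance (species_pairs : List (List Int)) (out : Int) : Decidable (Spec_num_equiv_species_pairs species_pairs out) := by unfold Spec_num_equiv_species_pairs; infer_instance

-- ===== CLAIM (what is proved, stated in full; the proofs are below) =====
def Claim_equal_num_equiv_species_pairs : Prop := ∀ (species_pairs : List (List Int)), Dom_num_equiv_species_pairs species_pairs → Pre_num_equiv_species_pairs species_pairs → Spec_num_equiv_species_pairs species_pairs (num_equiv_species_pairs species_pairs)

-- ===== LEMMAS AND PROOFS =====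

-- the canonical (sorted) key of a pair, read exactly as both ports read it
def pvKey (p : List Int) : Int × Int :=
  if PySem.List.pyGetD p 0 0 ≤ PySem.List.pyGetD p 1 0
  then (PySem.List.pyGetD p 0 0, PySem.List.pyGetD p 1 0)
  else (PySem.List.pyGetD p 1 0, PySem.List.pyGetD p 0 0)

-- number of unordered equal-key index pairs i < j, defined structurally
def pvCnt : List (Int × Int) → Int
  | [] => 0
  | k :: ks => (ks.count k : Int) + pvCnt ks

-- C(m,2) the way B computes it
def pvC2 (m : Int) : Int := PySem.Int.floordiv (m * (m - 1)) 2

theorem pvC2_succ (m : Int) : pvC2 (m + 1) = pvC2 m + m := by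
  obtain ⟨k, hk⟩ : Even (m * (m - 1)) := Int.even_mul_pred_self m
  unfold pvC2
  rw [PySem.Int.floordiv_eq_ediv_of_pos (by omega), PySem.Int.floordiv_eq_ediv_of_pos (by omega)]
  have h1 : (m + 1) * (m + 1 - 1) = 2 * (k + m) := by linear_combination hk
  have h2 : m * (m - 1) = 2 * k := by linear_combination hk
  rw [h1, h2, Int.mul_ediv_cancel_left _ (by norm_num), Int.mul_ediv_cancel_left _ (by norm_num)]

-- A's match condition is equality of canonical keys
theorem pvMatch_iff (p q : List Int) :
    ((PySem.List.pyGetD p 0 0 = PySem.List.pyGetD q 0 0 ∧ PySem.List.pyGetD p 1 0 = PySem.List.pyGetD q 1 0) ∨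
     (PySem.List.pyGetD p 0 0 = PySem.List.pyGetD q 1 0 ∧ PySem.List.pyGetD p 1 0 = PySem.List.pyGetD q 0 0)) ↔
    pvKey p = pvKey q := by
  unfold pvKey
  split_ifs <;> simp [Prod.ext_iff] <;> omega

-- A's double loop over clean Nat indices
theorem pvOuter (sp : List (List Int)) (init : Int) :
    (List.range sp.length).foldl
      (fun counter i => (sp.drop (i + 1)).foldl
        (fun c q => if pvKey (sp.getD i []) = pvKey q then c + 1 else c) counter) init
    = init + pvCnt (sp.map pvKey) := by
  induction sp generalizing init with
  | nil => simp [pvCnt]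
  | cons p rest ih =>
    have hfirst : rest.foldl (fun c q => if pvKey p = pvKey q then c + 1 else c) init
        = init + ((rest.map pvKey).count (pvKey p) : Int) := by
      have hcnt : List.count (pvKey p) (rest.map pvKey)
          = rest.countP (fun q => decide (pvKey p = pvKey q)) := by
        rw [List.count, List.countP_map]
        congr 1
        funext q
        exact Bool.eq_iff_iff.mpr (by simp only [Function.comp_apply, beq_iff_eq, decide_eq_true_eq]; exact eq_comm)
      rw [hcnt]
      calc rest.foldl (fun c q => if pvKey p = pvKey q then c + 1 else c) init
          = rest.foldl (fun c q => if decide (pvKey p = pvKey q) = true then c + 1 else c) init := by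
            simp only [decide_eq_true_eq]
        _ = init + (rest.countP (fun q => decide (pvKey p = pvKey q)) : Int) :=
            PySem.List.foldl_count_if (fun q => decide (pvKey p = pvKey q)) rest init
    calc (List.range (p :: rest).length).foldl
          (fun counter i => ((p :: rest).drop (i + 1)).foldl
            (fun c q => if pvKey ((p :: rest).getD i []) = pvKey q then c + 1 else c) counter) init
        = (List.range rest.length).foldl
            (fun counter i => ((p :: rest).drop (i + 1 + 1)).foldl
              (fun c q => if pvKey ((p :: rest).getD (i + 1) []) = pvKey q then c + 1 else c) counter)
            (rest.foldl (fun c q => if pvKey p = pvKey q then c + 1 else c) init) := by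
          rw [List.length_cons, List.range_succ_eq_map, List.foldl_cons, List.foldl_map]
          rfl
      _ = (List.range rest.length).foldl
            (fun counter i => (rest.drop (i + 1)).foldl
              (fun c q => if pvKey (rest.getD i []) = pvKey q then c + 1 else c) counter)
            (rest.foldl (fun c q => if pvKey p = pvKey q then c + 1 else c) init) := by
          simp only [List.drop_succ_cons, List.getD_cons_succ]
      _ = (rest.foldl (fun c q => if pvKey p = pvKey q then c + 1 else c) init)
            + pvCnt (rest.map pvKey) := ih _
      _ = init + pvCnt ((p :: rest).map pvKey) := by
          rw [hfirst]
          simp only [List.map_cons, pvCnt]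
          ring

-- A computes pvCnt of the key list
theorem pvA_eq (sp : List (List Int)) :
    num_equiv_species_pairs sp = pvCnt (sp.map pvKey) := by
  unfold num_equiv_species_pairs
  rw [PySem.List.len_eq, PySem.List.pyRange_zero_natCast, List.foldl_map]
  have h0 : pvCnt (sp.map pvKey) = (0 : Int) + pvCnt (sp.map pvKey) := by ring
  rw [h0, ← pvOuter sp 0]
  apply PySem.List.foldl_congr_mem
  intro acc i hi
  show (PySem.List.pyRange ((i : Int) + 1) (PySem.List.len sp) 1).foldl
      (fun counter j =>
        if (PySem.List.pyGetD (PySem.List.pyGetD sp (i : Int) []) 0 0 = PySem.List.pyGetD (PySem.List.pyGetD sp j []) 0 0 ∧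
            PySem.List.pyGetD (PySem.List.pyGetD sp (i : Int) []) 1 0 = PySem.List.pyGetD (PySem.List.pyGetD sp j []) 1 0) ∨
           (PySem.List.pyGetD (PySem.List.pyGetD sp (i : Int) []) 0 0 = PySem.List.pyGetD (PySem.List.pyGetD sp j []) 1 0 ∧
            PySem.List.pyGetD (PySem.List.pyGetD sp (i : Int) []) 1 0 = PySem.List.pyGetD (PySem.List.pyGetD sp j []) 0 0)
        then counter + 1 else counter) acc
    = (sp.drop (i + 1)).foldl (fun c q => if pvKey (sp.getD i []) = pvKey q then c + 1 else c) acc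
  calc _ = (sp.drop ((i : Int) + 1).toNat).foldl
        (fun counter q =>
          if (PySem.List.pyGetD (PySem.List.pyGetD sp (i : Int) []) 0 0 = PySem.List.pyGetD q 0 0 ∧
              PySem.List.pyGetD (PySem.List.pyGetD sp (i : Int) []) 1 0 = PySem.List.pyGetD q 1 0) ∨
             (PySem.List.pyGetD (PySem.List.pyGetD sp (i : Int) []) 0 0 = PySem.List.pyGetD q 1 0 ∧
              PySem.List.pyGetD (PySem.List.pyGetD sp (i : Int) []) 1 0 = PySem.List.pyGetD q 0 0)
          then counter + 1 else counter) acc :=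
      PySem.List.foldl_pyRange_pyGetD sp []
        (fun counter q =>
          if (PySem.List.pyGetD (PySem.List.pyGetD sp (i : Int) []) 0 0 = PySem.List.pyGetD q 0 0 ∧
              PySem.List.pyGetD (PySem.List.pyGetD sp (i : Int) []) 1 0 = PySem.List.pyGetD q 1 0) ∨
             (PySem.List.pyGetD (PySem.List.pyGetD sp (i : Int) []) 0 0 = PySem.List.pyGetD q 1 0 ∧
              PySem.List.pyGetD (PySem.List.pyGetD sp (i : Int) []) 1 0 = PySem.List.pyGetD q 0 0)
          then counter + 1 else counter) acc (by omega)
    _ = (sp.drop (i + 1)).foldl (fun c q => if pvKey (sp.getD i []) = pvKey q then c + 1 else c) acc := by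
      rw [show ((i : Int) + 1).toNat = i + 1 by omega, PySem.List.pyGetD_natCast]
      apply PySem.List.foldl_congr_mem
      intro c q hq
      exact if_congr (pvMatch_iff (sp.getD i []) q) rfl rfl

-- summing an indicator over a Nodup support picks out the one hit
theorem pvSum_ite (x : Int × Int) (c : Int) :
    ∀ (S : List (Int × Int)), S.Nodup → x ∈ S →
      (S.map (fun k => if k = x then c else 0)).sum = c := by
  intro S
  induction S with
  | nil => intro _ h; exact absurd h (by simp)
  | cons s S ih =>
    intro hnd hx
    rcases List.nodup_cons.mp hnd with ⟨hns, hndS⟩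
    by_cases h : s = x
    · subst h
      have hz : ∀ k ∈ S, ¬(k = s) := fun k hk he => hns (he ▸ hk)
      have hzero : (S.map (fun k => if k = s then c else 0)).sum = 0 := by
        rw [List.map_congr_left (fun k hk => if_neg (hz k hk))]
        simp
      simp [hzero]
    · have hx' : x ∈ S := by
        rcases List.mem_cons.mp hx with h' | h'
        · exact absurd h'.symm h
        · exact h'
      simp only [List.map_cons, List.sum_cons, if_neg h, zero_add]
      exact ih hndS hx'

-- ∑ over a Nodup support of C(count,2) equals pvCnt
theorem pvSum_c2 (S : List (Int × Int)) (hnd : S.Nodup) :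
    ∀ (ks : List (Int × Int)), (∀ k ∈ ks, k ∈ S) →
      (S.map (fun k => pvC2 (ks.count k : Int))).sum = pvCnt ks := by
  intro ks
  induction ks with
  | nil =>
    intro _
    have hall : ∀ k ∈ S, pvC2 ((([] : List (Int × Int)).count k : Int)) = (fun _ => (0 : Int)) k := by
      intro k _
      simp only [List.count_nil, Nat.cast_zero]
      decide
    rw [List.map_congr_left hall]
    simp [pvCnt]
  | cons x ks ih =>
    intro hsub
    have hx : x ∈ S := hsub x (by simp)
    have hsub' : ∀ k ∈ ks, k ∈ S := fun k hk => hsub k (List.mem_cons_of_mem _ hk)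
    have hmap : (S.map (fun k => pvC2 ((x :: ks).count k : Int))).sum
        = (S.map (fun k => pvC2 (ks.count k : Int) + (if k = x then (ks.count x : Int) else 0))).sum := by
      congr 1
      apply List.map_congr_left
      intro k _
      by_cases h : k = x
      · subst h
        rw [List.count_cons_self]
        push_cast
        rw [pvC2_succ]
        simp
      · have h3 : ¬ x = k := fun he => h he.symm
        have h2 : (x :: ks).count k = ks.count k := by simp [h3]
        rw [h2]
        simp [h]
    rw [hmap, PySem.List.sum_map_add_int, ih hsub', pvSum_ite x (ks.count x : Int) S hnd hx]
    simp only [pvCnt]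
    ring

-- B's counting dict, applied to an arbitrary key list
theorem pvCounts (ks : List (Int × Int)) :
    (((ks.foldl (fun (d : PySem.Dict (Int × Int) Int) k => d.insert k (d.getD k 0 + 1)) PySem.Dict.empty).values).map
      (fun k => PySem.Int.floordiv (k * (k - 1)) 2)).sum = pvCnt ks := by
  set cnts := ks.foldl (fun (d : PySem.Dict (Int × Int) Int) k => d.insert k (d.getD k 0 + 1)) PySem.Dict.empty with hc
  have hnd : cnts.keys.Nodup := by
    rw [hc]
    exact PySem.Dict.nodup_keys_foldl_insert ks _ _ PySem.Dict.nodup_keys_empty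
  have hkeys : cnts.keys = PySem.Set.ofList ks := by
    rw [hc, PySem.Dict.keys_foldl_insert]
    simp [PySem.Dict.keys_empty, PySem.Set.update_nil_left]
  have hgetD : ∀ k, cnts.getD k 0 = (ks.count k : Int) := by
    intro k
    rw [hc, PySem.Dict.getD_foldl_insert_add_one]
    simp
  rw [PySem.Dict.values_eq_map_keys cnts hnd 0, List.map_map, hkeys]
  rw [List.map_congr_left (l := PySem.Set.ofList ks)
    (f := (fun k => PySem.Int.floordiv (k * (k - 1)) 2) ∘ fun k => cnts.getD k 0)
    (g := fun k => pvC2 (ks.count k : Int))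
    (fun k _ => by simp [Function.comp, hgetD k, pvC2])]
  exact pvSum_c2 (PySem.Set.ofList ks) (PySem.Set.nodup_ofList ks) ks
    (fun k hk => (PySem.Set.mem_ofList ks k).mpr hk)

-- B computes the same
theorem pvB_eq (sp : List (List Int)) :
    num_equiv_species_pairs_alt sp = pvCnt (sp.map pvKey) := by
  have h := pvCounts (sp.map pvKey)
  rw [List.foldl_map] at h
  exact h

-- ===== VERDICT (by name: the statement is the Claim_ definition above) =====
theorem num_equiv_species_pairs_spec : Claim_equal_num_equiv_species_pairs := by
  intro sp _ _
  unfold Spec_num_equiv_species_pairs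
  rw [pvA_eq, pvB_eq]
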